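-- pv_equiv track=rewrite | github.com/Cephei18/form_parser | src/mapping.py | detect_table_regions
-- ===== SOURCE A (Python) =====
-- def detect_table_regions(lines, y_threshold=15, min_lines=5):
--     """Detect vertically dense regions of lines (likely tables)."""
--     regions = []
--
--     if not lines:
--         return regions
--
--     lines_sorted = sorted(lines, key=lambda l: l["start"][1])
--
--     current_group = [lines_sorted[0]]
--
--     for i in range(1, len(lines_sorted)):
--         prev = lines_sorted[i - 1]
--         curr = lines_sorted[i]
--
--         if abs(curr["start"][1] - prev["start"][1]) < y_threshold:
--             current_group.append(curr)
--         else: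
--             if len(current_group) >= min_lines:
--                 regions.append(current_group)
--             current_group = [curr]
--
--     if len(current_group) >= min_lines:
--         regions.append(current_group)
--
--     return regions
-- ===== SOURCE B (Python) =====
-- def detect_table_regions(lines, y_threshold=15, min_lines=5):
--     """Detect vertically dense regions of lines (likely tables)."""
--     if not lines:
--         return []
--     ls = sorted(lines, key=lambda l: l["start"][1])
--     n = len(ls)
--     ys = [l["start"][1] for l in ls]
--     breaks = [0] + [i for i in range(1, n) if abs(ys[i] - ys[i - 1]) >= y_threshold] + [n]
--     groups = [ls[a:b] for a, b in zip(breaks, breaks[1:])]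
--     return [g for g in groups if len(g) >= min_lines]
-- ===== Notes on version B (the rewrite author's own statement) =====
-- stated objective: alternative
-- what changed: Replaces A's interleaved accumulate-and-flush loop by a three-stage pipeline: compute the break indices between consecutive sorted lines, materialise the groups as slices between consecutive breaks, then filter groups by min_lines.
import Mathlib
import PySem

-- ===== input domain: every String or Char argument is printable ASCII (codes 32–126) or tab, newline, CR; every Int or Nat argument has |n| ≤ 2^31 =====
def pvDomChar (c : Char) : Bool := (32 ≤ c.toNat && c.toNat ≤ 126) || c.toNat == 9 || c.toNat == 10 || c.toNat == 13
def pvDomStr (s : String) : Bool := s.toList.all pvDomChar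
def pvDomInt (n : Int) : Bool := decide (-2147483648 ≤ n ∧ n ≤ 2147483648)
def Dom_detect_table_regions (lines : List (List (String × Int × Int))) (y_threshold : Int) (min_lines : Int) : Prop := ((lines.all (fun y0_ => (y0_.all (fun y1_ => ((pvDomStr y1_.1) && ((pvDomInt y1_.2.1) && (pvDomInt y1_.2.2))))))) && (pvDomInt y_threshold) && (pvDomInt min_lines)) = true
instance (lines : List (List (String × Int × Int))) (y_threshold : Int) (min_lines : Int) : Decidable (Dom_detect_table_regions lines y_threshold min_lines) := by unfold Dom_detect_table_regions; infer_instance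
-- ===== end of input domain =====

-- B replaces A's accumulate-and-flush loop by break indices + slicing + filtering (objective: alternative).

-- ===== PORT A =====
-- l["start"][1] : first-match lookup; exact whenever the line carries the key "start" (Pre_)
def pvLineY (l : List (String × Int × Int)) : Int :=
  ((PySem.Dict.mk l).getD "start" (0, 0)).2

def detect_table_regions (lines : List (List (String × Int × Int))) (y_threshold : Int) (min_lines : Int) : List (List (List (String × Int × Int))) :=
  if lines = [] then []
  else
    let ls := PySem.List.sorted lines pvLineY false
    let st := (PySem.List.pyRange 1 (ls.length : Int) 1).foldl
      (fun (st : List (List (List (String × Int × Int))) × List (List (String × Int × Int))) i =>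
        let prev := PySem.List.pyGetD ls (i - 1) []
        let curr := PySem.List.pyGetD ls i []
        if |pvLineY curr - pvLineY prev| < y_threshold then
          (st.1, st.2 ++ [curr])
        else if min_lines ≤ (st.2.length : Int) then (st.1 ++ [st.2], [curr])
        else (st.1, [curr]))
      ([], [PySem.List.pyGetD ls 0 []])
    if min_lines ≤ (st.2.length : Int) then st.1 ++ [st.2] else st.1

-- ===== PORT B =====
def detect_table_regions_alt (lines : List (List (String × Int × Int))) (y_threshold : Int) (min_lines : Int) : List (List (List (String × Int × Int))) :=
  if lines = [] then []
  else
    let ls := PySem.List.sorted lines pvLineY false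
    let n : Int := ls.length
    let ys := ls.map pvLineY
    let breaks := [0] ++ (PySem.List.pyRange 1 n 1).filter
        (fun i => decide (y_threshold ≤ |PySem.List.pyGetD ys i 0 - PySem.List.pyGetD ys (i - 1) 0|)) ++ [n]
    let groups := (breaks.zip breaks.tail).map (fun p => PySem.List.slice ls (some p.1) (some p.2))
    groups.filter (fun g => decide (min_lines ≤ (g.length : Int)))

-- ===== PRECONDITION & SPEC =====
-- Pre_ excludes exactly the inputs where A raises KeyError: a line without the key "start".
def Pre_detect_table_regions (lines : List (List (String × Int × Int))) (y_threshold : Int) (min_lines : Int) : Prop :=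
  ∀ l ∈ lines, (PySem.Dict.mk l).contains "start" = true
instance (lines : List (List (String × Int × Int))) (y_threshold : Int) (min_lines : Int) : Decidable (Pre_detect_table_regions lines y_threshold min_lines) := by unfold Pre_detect_table_regions; infer_instance

def pvWitness_detect_table_regions : (List (List (String × Int × Int))) × Int × Int :=
  ([[("start", 0, 0)], [("start", 3, 4)]], 15, 1)

def Spec_detect_table_regions (lines : List (List (String × Int × Int))) (y_threshold : Int) (min_lines : Int) (out : List (List (List (String × Int × Int)))) : Prop := out = detect_table_regions_alt lines y_threshold min_lines
instance (lines : List (List (String × Int × Int))) (y_threshold : Int) (min_lines : Int) (out : List (List (List (String × Int × Int)))) : Decidable (Spec_detect_table_regions lines y_threshold min_lines out) := by unfold Spec_detect_table_regions; infer_instance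

-- ===== CLAIM (what is proved, stated in full; the proofs are below) =====
def Claim_equal_detect_table_regions : Prop := ∀ (lines : List (List (String × Int × Int))) (y_threshold : Int) (min_lines : Int), Dom_detect_table_regions lines y_threshold min_lines → Pre_detect_table_regions lines y_threshold min_lines → Spec_detect_table_regions lines y_threshold min_lines (detect_table_regions lines y_threshold min_lines)

-- ===== LEMMAS AND PROOFS =====

-- generic pairwise traversal: state threaded through consecutive (prev, curr) pairs
def pvPairGo {σ α : Type} (F : σ → α → α → σ) (st : σ) (prev : α) : List α → σ
  | [] => st
  | c :: rest => pvPairGo F (F st prev c) c rest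

-- maximal runs of the sorted list, forward, current group g accumulated
def pvRunsF (th : Int) (prev : List (String × Int × Int)) (g : List (List (String × Int × Int))) :
    List (List (String × Int × Int)) → List (List (List (String × Int × Int)))
  | [] => [g]
  | c :: rest =>
      if |pvLineY c - pvLineY prev| < th then pvRunsF th c (g ++ [c]) rest
      else g :: pvRunsF th c [c] rest

-- A's loop body as a function of (prev, curr)
def pvStepA (th ml : Int)
    (st : List (List (List (String × Int × Int))) × List (List (String × Int × Int)))
    (prev curr : List (String × Int × Int)) :
    List (List (List (String × Int × Int))) × List (List (String × Int × Int)) :=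
  if |pvLineY curr - pvLineY prev| < th then (st.1, st.2 ++ [curr])
  else if ml ≤ (st.2.length : Int) then (st.1 ++ [st.2], [curr])
  else (st.1, [curr])

-- A's index fold over range(1, n) is the pairwise traversal
theorem pvFoldRange {σ α : Type} (F : σ → α → α → σ) (ls : List α) (d : α) :
    ∀ (k s : Nat), ls.length - s = k → 1 ≤ s → s ≤ ls.length → ∀ st : σ,
    (PySem.List.pyRange (s : Int) (ls.length : Int) 1).foldl
      (fun st i => F st (PySem.List.pyGetD ls (i - 1) d) (PySem.List.pyGetD ls i d)) st
    = pvPairGo F st (ls.getD (s - 1) d) (ls.drop s) := by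
  intro k
  induction k with
  | zero =>
    intro s hk h1 h2 st
    have hs : s = ls.length := by omega
    subst hs
    rw [PySem.List.pyRange_one_eq_nil (by omega)]
    simp [pvPairGo, List.drop_length]
  | succ k ih =>
    intro s hk h1 h2 st
    have hlt : s < ls.length := by omega
    rw [PySem.List.pyRange_one_cons (by exact_mod_cast hlt)]
    simp only [List.foldl_cons]
    have e1 : ((s : Int) - 1) = ((s - 1 : Nat) : Int) := by omega
    have e2 : ((s : Int) + 1) = ((s + 1 : Nat) : Int) := by omega
    rw [e1, e2, PySem.List.pyGetD_natCast, PySem.List.pyGetD_natCast,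
      ih (s + 1) (by omega) (by omega) (by omega)]
    have hdrop : ls.drop s = ls[s] :: ls.drop (s + 1) := List.drop_eq_getElem_cons hlt
    rw [hdrop]
    simp [pvPairGo, List.getD, List.getElem?_eq_getElem hlt]

-- flushing A's final state equals filtering the runs
theorem pvGoA_eq (th ml : Int) :
    ∀ (rest : List (List (String × Int × Int))) (prev : List (String × Int × Int))
      (rs : List (List (List (String × Int × Int)))) (g : List (List (String × Int × Int))),
    (let st := pvPairGo (pvStepA th ml) (rs, g) prev rest;
     if ml ≤ (st.2.length : Int) then st.1 ++ [st.2] else st.1)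
    = rs ++ (pvRunsF th prev g rest).filter (fun g => decide (ml ≤ (g.length : Int))) := by
  intro rest
  induction rest with
  | nil =>
    intro prev rs g
    simp only [pvPairGo, pvRunsF, List.filter]
    by_cases h : ml ≤ (g.length : Int) <;> simp [h]
  | cons c rest ih =>
    intro prev rs g
    simp only [pvPairGo, pvRunsF, pvStepA]
    by_cases h : |pvLineY c - pvLineY prev| < th
    · simp only [h, if_pos]
      exact ih c rs (g ++ [c])
    · simp only [h, if_false, List.filter]
      by_cases h2 : ml ≤ (g.length : Int)
      · simp only [h2, if_pos, decide_true]
        rw [ih c (rs ++ [g]) [c]]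
        simp [List.append_assoc]
      · simp only [h2, if_false]
        rw [ih c rs [c]]
        simp

-- the tail of B's breaks list, starting the range at s
def pvBreaksTail (th : Int) (ls : List (List (String × Int × Int))) (s : Nat) : List Int :=
  (PySem.List.pyRange (s : Int) (ls.length : Int) 1).filter
      (fun i => decide (th ≤ |PySem.List.pyGetD (ls.map pvLineY) i 0 -
                            PySem.List.pyGetD (ls.map pvLineY) (i - 1) 0|)) ++ [(ls.length : Int)]

-- the slices between consecutive breaks are the runs
theorem pvSlices (th : Int) (ls : List (List (String × Int × Int))) :
    ∀ (k s a : Nat), ls.length - s = k → 1 ≤ s → s ≤ ls.length → a < s →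
    (((a : Int) :: pvBreaksTail th ls s).zip (pvBreaksTail th ls s)).map
      (fun p => PySem.List.slice ls (some p.1) (some p.2))
    = pvRunsF th (ls.getD (s - 1) []) ((ls.drop a).take (s - a)) (ls.drop s) := by
  intro k
  induction k with
  | zero =>
    intro s a hk h1 h2 ha
    have hs : s = ls.length := by omega
    subst hs
    unfold pvBreaksTail
    rw [PySem.List.pyRange_one_eq_nil (by omega)]
    simp only [List.filter_nil, List.nil_append, List.zip_cons_cons, List.zip_nil_right,
      List.map_cons, List.map_nil, List.drop_length]
    rw [PySem.List.slice_natCast]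
    simp [pvRunsF]
  | succ k ih =>
    intro s a hk h1 h2 ha
    have hlt : s < ls.length := by omega
    have hys : PySem.List.pyGetD (ls.map pvLineY) (s : Int) 0 = pvLineY ls[s] := by
      rw [PySem.List.pyGetD_natCast]
      simp [List.getD, List.getElem?_map, List.getElem?_eq_getElem hlt]
    have hys' : PySem.List.pyGetD (ls.map pvLineY) ((s : Int) - 1) 0 = pvLineY (ls.getD (s - 1) []) := by
      have e1 : ((s : Int) - 1) = ((s - 1 : Nat) : Int) := by omega
      have hlt' : s - 1 < ls.length := by omega
      rw [e1, PySem.List.pyGetD_natCast]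
      simp [List.getD, List.getElem?_map, List.getElem?_eq_getElem hlt']
    have e2 : ((s : Int) + 1) = ((s + 1 : Nat) : Int) := by omega
    have hbt : pvBreaksTail th ls s =
        if th ≤ |pvLineY ls[s] - pvLineY (ls.getD (s - 1) [])| then
          (s : Int) :: pvBreaksTail th ls (s + 1)
        else pvBreaksTail th ls (s + 1) := by
      unfold pvBreaksTail
      rw [PySem.List.pyRange_one_cons (by exact_mod_cast hlt)]
      rw [List.filter_cons]
      simp only [hys, hys', e2]
      by_cases hb : th ≤ |pvLineY ls[s] - pvLineY (ls.getD (s - 1) [])|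
      · simp only [hb, decide_true, if_true, List.cons_append]
      · simp only [hb, decide_false, Bool.false_eq_true, if_false]
    have hdrop : ls.drop s = ls[s] :: ls.drop (s + 1) := List.drop_eq_getElem_cons hlt
    have hgd : ls.getD (s + 1 - 1) [] = ls[s] := by
      simp [List.getD, List.getElem?_eq_getElem hlt]
    have hg1 : (ls.drop s).take (s + 1 - s) = [ls[s]] := by
      have e5 : s + 1 - s = 1 := by omega
      rw [e5, hdrop]
      rfl
    rw [hbt]
    by_cases hb : th ≤ |pvLineY ls[s] - pvLineY (ls.getD (s - 1) [])|
    · simp only [hb, if_true]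
      rw [List.zip_cons_cons, List.map_cons]
      rw [ih (s + 1) s (by omega) (by omega) (by omega) (by omega), hg1, hgd]
      rw [PySem.List.slice_natCast, hdrop, pvRunsF]
      have hnb : ¬ |pvLineY ls[s] - pvLineY (ls.getD (s - 1) [])| < th := by omega
      simp only [hnb, if_false]
    · simp only [hb, if_false]
      rw [ih (s + 1) a (by omega) (by omega) (by omega) (by omega)]
      rw [hdrop, pvRunsF]
      have hcl : |pvLineY ls[s] - pvLineY (ls.getD (s - 1) [])| < th := by omega
      simp only [hcl, if_true]
      have hgrow : (ls.drop a).take (s + 1 - a) = (ls.drop a).take (s - a) ++ [ls[s]] := by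
        have e3 : s + 1 - a = (s - a) + 1 := by omega
        rw [e3, List.take_add_one]
        have hg : (ls.drop a)[s - a]? = some ls[s] := by
          rw [List.getElem?_drop]
          have e4 : a + (s - a) = s := by omega
          rw [e4, List.getElem?_eq_getElem hlt]
        simp [hg]
      rw [hgd, hgrow]

-- the two pipelines agree on any nonempty (sorted) list
theorem pvCore (th ml : Int) (ls : List (List (String × Int × Int))) (hne : ls ≠ []) :
    (let st := (PySem.List.pyRange 1 (ls.length : Int) 1).foldl
        (fun st i => pvStepA th ml st (PySem.List.pyGetD ls (i - 1) []) (PySem.List.pyGetD ls i []))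
        ([], [PySem.List.pyGetD ls 0 []]);
     if ml ≤ (st.2.length : Int) then st.1 ++ [st.2] else st.1)
    = ((((0 : Int) :: pvBreaksTail th ls 1).zip (pvBreaksTail th ls 1)).map
        (fun p => PySem.List.slice ls (some p.1) (some p.2))).filter
        (fun g => decide (ml ≤ (g.length : Int))) := by
  have hlen : 1 ≤ ls.length := List.length_pos_of_ne_nil hne
  have hget0 : PySem.List.pyGetD ls (0 : Int) [] = ls.getD 0 [] := by
    simpa using PySem.List.pyGetD_natCast ls 0 []
  have hA := pvFoldRange (pvStepA th ml) ls [] (ls.length - 1) 1 (by omega) (by omega) (by omega)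
    ([], [ls.getD 0 []])
  have hB := pvSlices th ls (ls.length - 1) 1 0 (by omega) (by omega) (by omega) (by omega)
  simp only [Nat.cast_one, Nat.cast_zero] at hA hB
  have htake : (ls.drop 0).take (1 - 0) = [ls.getD 0 []] := by
    obtain ⟨x, t, rfl⟩ := List.exists_cons_of_ne_nil hne
    simp [List.getD]
  rw [htake] at hB
  simp only [hget0, hA]
  have hA' := pvGoA_eq th ml (ls.drop 1) (ls.getD (1 - 1) []) [] [ls.getD 0 []]
  simp only [List.nil_append] at hA'
  rw [hA', ← hB]

theorem detect_table_regions_spec : Claim_equal_detect_table_regions := by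
  intro lines th ml _ _
  unfold Spec_detect_table_regions detect_table_regions detect_table_regions_alt
  by_cases hnil : lines = []
  · simp [hnil]
  · simp only [hnil, if_false]
    have hne : PySem.List.sorted lines pvLineY false ≠ [] := by
      rw [Ne, PySem.List.sorted_eq_nil_iff]; exact hnil
    have h := pvCore th ml (PySem.List.sorted lines pvLineY false) hne
    exact h
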